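-- pv_equiv track=rewrite | github.com/jakudapi/aoc2016 | day07-2.py | ssl_checker
-- ===== SOURCE A (Python) =====
-- def ssl_checker(hypernets, chunk):
--   '''
--   input:hypernets : list of strs representing text inside brackets (inludes brackets too) chunk:str. the IP string either outside brackets
--
--   output: boolean. if aba AND bab patterns around found
--   '''
--   chunk_length = len(chunk)
--   if chunk_length <= 2:
--     return False
--   else:
--     start_index = 0
--     stop_index = 3
--     while stop_index <= chunk_length:
--       test_aba = chunk[start_index:stop_index]
--       if test_aba[0] == test_aba[2] and test_aba[0] != test_aba[1] and bab_checker(hypernets, test_aba):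
--         return True
--       else:
--         start_index += 1
--         stop_index += 1
--   return False
--
-- def bab_checker(hypernets, valid_aba):
--   """
--   input: hypernets : list of strs representing text inside brackets (inludes brackets too)
--   valid_aba: str . valid aba sequence of letters as verified from aba_checker()
--   output: boolean if bab pattern is found
--   """
--   valid_bab = valid_aba[1] + valid_aba[0] + valid_aba[1]  # if "aba" ==> valid_bab assigned "bab"
--   for hypernet in hypernets:
--     if valid_bab in hypernet:
--       return True
--   return False
-- ===== SOURCE B (Python) =====
-- def ssl_checker(hypernets, chunk):
--   # two independent passes: collect the BAB implied by every ABA window of chunk,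
--   # collect every 3-char window of every hypernet, then test set intersection
--   babs = {b + a + b for a, b, c in zip(chunk, chunk[1:], chunk[2:]) if a == c and a != b}
--   subs = {a + b + c for h in hypernets for a, b, c in zip(h, h[1:], h[2:])}
--   return not babs.isdisjoint(subs)
-- ===== Notes on version B (the rewrite author's own statement) =====
-- stated objective: alternative
-- what changed: Replaces A's aba-window scan with a nested substring search over all hypernets per window by two independent single passes - a set of BAB strings implied by the chunk's ABA windows and a set of all 3-char windows of the hypernets - finished by one set-disjointness test; same result, no nested scan.
import Mathlib
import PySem

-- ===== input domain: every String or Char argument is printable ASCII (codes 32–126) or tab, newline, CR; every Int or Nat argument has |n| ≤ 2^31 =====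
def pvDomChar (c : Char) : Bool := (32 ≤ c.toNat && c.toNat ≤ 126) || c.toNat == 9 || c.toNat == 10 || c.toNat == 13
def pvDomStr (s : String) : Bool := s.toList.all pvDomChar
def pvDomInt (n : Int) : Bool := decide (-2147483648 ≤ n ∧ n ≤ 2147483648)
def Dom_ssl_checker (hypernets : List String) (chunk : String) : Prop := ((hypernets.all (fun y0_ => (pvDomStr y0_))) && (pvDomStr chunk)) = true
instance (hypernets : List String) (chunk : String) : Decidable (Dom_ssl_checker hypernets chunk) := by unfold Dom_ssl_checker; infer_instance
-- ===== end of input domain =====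

-- B replaces A's nested aba-scan-then-hypernet-scan with two independent window passes
-- (BAB forms of chunk; 3-windows of hypernets) and one set-intersection test.

-- ===== PORT A =====
-- bab_checker: 'for hypernet in hypernets: if valid_bab in hypernet: return True / return False'
def bab_checker (hypernets : List String) (valid_aba : List Char) : Bool :=
  -- valid_bab = valid_aba[1] + valid_aba[0] + valid_aba[1]; indices in range: callers pass a length-3 slice
  let valid_bab : List Char := [valid_aba.getD 1 ' ', valid_aba.getD 0 ' ', valid_aba.getD 1 ' ']
  hypernets.any (fun hypernet => PySem.Chars.isIn valid_bab hypernet.toList)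

-- the while-loop of ssl_checker: start/stop indices advance by 1, stop = start + 3
def sslLoopA (hypernets : List String) (cs : List Char) (start : Nat) : Bool :=
  if h : start + 3 ≤ cs.length then
    let test_aba := PySem.List.slice cs (some (start : Int)) (some ((start : Int) + 3))
    -- test_aba[0] / [1] / [2]: in range, the slice has length 3 here
    if test_aba.getD 0 ' ' == test_aba.getD 2 ' ' && test_aba.getD 0 ' ' != test_aba.getD 1 ' '
        && bab_checker hypernets test_aba then
      true
    else
      sslLoopA hypernets cs (start + 1)
  else
    false
termination_by cs.length - start
decreasing_by omega

def ssl_checker (hypernets : List String) (chunk : String) : Bool :=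
  let chunk_length := chunk.toList.length
  if chunk_length ≤ 2 then false
  else sslLoopA hypernets chunk.toList 0

-- ===== PORT B =====
-- zip(s, s[1:], s[2:]) : all contiguous 3-windows
def zip3 (cs : List Char) : List (Char × Char × Char) :=
  cs.zip (cs.tail.zip cs.tail.tail)

def ssl_checker_alt (hypernets : List String) (chunk : String) : Bool :=
  let babs : PySem.Set (List Char) :=
    PySem.Set.ofList ((zip3 chunk.toList).filterMap
      (fun t => if t.1 = t.2.2 ∧ t.1 ≠ t.2.1 then some [t.2.1, t.1, t.2.1] else none))
  let subs : PySem.Set (List Char) :=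
    PySem.Set.ofList (hypernets.flatMap
      (fun h => (zip3 h.toList).map (fun t => [t.1, t.2.1, t.2.2])))
  -- not babs.isdisjoint(subs)
  !(PySem.Set.isdisjoint babs subs)

-- ===== PRECONDITION & SPEC =====
def Spec_ssl_checker (hypernets : List String) (chunk : String) (out : Bool) : Prop := out = ssl_checker_alt hypernets chunk
instance (hypernets : List String) (chunk : String) (out : Bool) : Decidable (Spec_ssl_checker hypernets chunk out) := by unfold Spec_ssl_checker; infer_instance

-- ===== CLAIM (what is proved, stated in full; the proofs are below) =====
def Claim_equal_ssl_checker : Prop := ∀ (hypernets : List String) (chunk : String), Dom_ssl_checker hypernets chunk → Spec_ssl_checker hypernets chunk (ssl_checker hypernets chunk)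

-- ===== LEMMAS AND PROOFS =====

lemma zip3_cons3 (a b c : Char) (l : List Char) :
    zip3 (a :: b :: c :: l) = (a, b, c) :: zip3 (b :: c :: l) := by
  simp [zip3]

lemma zip3_short (l : List Char) (h : l.length < 3) : zip3 l = [] := by
  match l, h with
  | [], _ => rfl
  | [_], _ => rfl
  | [_, _], _ => rfl

lemma mem_zip3_iff_infix (l : List Char) (a b c : Char) :
    ((a, b, c) ∈ zip3 l) ↔ [a, b, c] <:+: l := by
  induction l with
  | nil => constructor
           · intro h; simp [zip3] at h
           · intro h; have := h.length_le; simp at this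
  | cons x xs ih =>
    match xs with
    | [] =>
      constructor
      · intro h; simp [zip3] at h
      · intro h; have := h.length_le; simp at this
    | [y] =>
      constructor
      · intro h; simp [zip3] at h
      · intro h; have := h.length_le; simp at this
    | y :: z :: zs =>
      rw [zip3_cons3, List.mem_cons, ih]
      simp [List.infix_cons_iff, List.cons_prefix_cons, Prod.ext_iff]

-- membership in the subs table = some hypernet has the 3-window
lemma mem_subs_iff (hypernets : List String) (a b c : Char) :
    ([a, b, c] ∈ hypernets.flatMap
      (fun h => (zip3 h.toList).map (fun t => [t.1, t.2.1, t.2.2]))) ↔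
    ∃ h ∈ hypernets, (a, b, c) ∈ zip3 h.toList := by
  simp only [List.mem_flatMap, List.mem_map]
  constructor
  · rintro ⟨h, hh, ⟨x, y, z⟩, ht, heq⟩
    simp only [List.cons.injEq, and_true] at heq
    obtain ⟨h1, h2, h3⟩ := heq
    subst h1; subst h2; subst h3
    exact ⟨h, hh, ht⟩
  · rintro ⟨h, hh, ht⟩
    exact ⟨h, hh, (a, b, c), ht, rfl⟩

lemma bab_checker_iff (hypernets : List String) (a b c : Char) :
    bab_checker hypernets [a, b, c] = true ↔
    [b, a, b] ∈ hypernets.flatMap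
      (fun h => (zip3 h.toList).map (fun t => [t.1, t.2.1, t.2.2])) := by
  rw [mem_subs_iff]
  simp only [bab_checker, List.getD_cons_succ, List.getD_cons_zero, List.any_eq_true]
  constructor <;> rintro ⟨h, hh, hx⟩
  · exact ⟨h, hh, (mem_zip3_iff_infix _ b a b).2 ((PySem.Chars.isIn_iff_infix _ _).1 hx)⟩
  · exact ⟨h, hh, (PySem.Chars.isIn_iff_infix _ _).2 ((mem_zip3_iff_infix _ b a b).1 hx)⟩

lemma sslLoopA_iff (hypernets : List String) (cs : List Char) (start : Nat) :
    sslLoopA hypernets cs start = true ↔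
    ∃ t ∈ zip3 (cs.drop start),
      t.1 = t.2.2 ∧ t.1 ≠ t.2.1 ∧ bab_checker hypernets [t.1, t.2.1, t.2.2] = true := by
  induction hn : cs.length - start using Nat.strong_induction_on generalizing start with
  | _ n ih =>
  rw [sslLoopA]
  by_cases h : start + 3 ≤ cs.length
  · rw [dif_pos h]
    obtain ⟨a, b, c, rest, hd⟩ : ∃ a b c rest, cs.drop start = a :: b :: c :: rest := by
      have h3 : 3 ≤ (cs.drop start).length := by simp; omega
      rcases e : cs.drop start with _ | ⟨a, _ | ⟨b, _ | ⟨c, rest⟩⟩⟩ <;>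
        first
          | exact ⟨a, b, c, rest, rfl⟩
          | (rw [e] at h3; simp at h3)
    have hs : PySem.List.slice cs (some (start : Int)) (some ((start : Int) + 3)) = [a, b, c] := by
      have h2 := PySem.List.slice_natCast_add cs start 3
      push_cast at h2
      rw [h2, hd]
      rfl
    rw [hs]
    have hd1 : cs.drop (start + 1) = b :: c :: rest := by
      rw [← List.tail_drop, hd]
      rfl
    simp only [List.getD_cons_succ, List.getD_cons_zero]
    by_cases hc : (a == c && (a != b) && bab_checker hypernets [a, b, c]) = true
    · rw [if_pos hc]
      simp only [Bool.and_eq_true, beq_iff_eq, bne_iff_ne, ne_eq] at hc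
      rw [hd, zip3_cons3]
      exact ⟨fun _ => ⟨(a, b, c), List.mem_cons_self .., hc.1.1, hc.1.2, hc.2⟩, fun _ => rfl⟩
    · rw [if_neg hc]
      rw [ih (cs.length - (start + 1)) (by omega) (start + 1) rfl]
      rw [hd, hd1, zip3_cons3]
      constructor
      · rintro ⟨t, ht, hP⟩
        exact ⟨t, List.mem_cons_of_mem _ ht, hP⟩
      · rintro ⟨t, ht, hP⟩
        rcases List.mem_cons.1 ht with h1 | h1
        · exfalso
          subst h1
          apply hc
          simp only [Bool.and_eq_true, beq_iff_eq, bne_iff_ne, ne_eq]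
          exact ⟨⟨hP.1, hP.2.1⟩, hP.2.2⟩
        · exact ⟨t, h1, hP⟩
  · rw [dif_neg h]
    have hz : zip3 (cs.drop start) = [] := by
      apply zip3_short
      simp
      omega
    simp [hz]

lemma alt_iff (hypernets : List String) (chunk : String) :
    ssl_checker_alt hypernets chunk = true ↔
    ∃ t ∈ zip3 chunk.toList,
      t.1 = t.2.2 ∧ t.1 ≠ t.2.1 ∧
      [t.2.1, t.1, t.2.1] ∈ hypernets.flatMap
        (fun h => (zip3 h.toList).map (fun t => [t.1, t.2.1, t.2.2])) := by
  simp only [ssl_checker_alt, Bool.not_eq_true', Bool.eq_false_iff, ne_eq,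
    PySem.Set.isdisjoint_iff]
  push_neg
  constructor
  · rintro ⟨x, hx, hmem⟩
    rw [PySem.Set.mem_ofList] at hx hmem
    obtain ⟨t, ht, hsome⟩ := List.mem_filterMap.1 hx
    split_ifs at hsome with hcond
    · cases hsome
      exact ⟨t, ht, hcond.1, hcond.2, hmem⟩
  · rintro ⟨t, ht, h1, h2, h3⟩
    refine ⟨[t.2.1, t.1, t.2.1], ?_, ?_⟩ <;> rw [PySem.Set.mem_ofList]
    · exact List.mem_filterMap.2 ⟨t, ht, by rw [if_pos ⟨h1, h2⟩]⟩
    · exact h3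

-- ===== VERDICT (by name: the statement is the Claim_ definition above) =====
theorem ssl_checker_spec : Claim_equal_ssl_checker := by
  intro hypernets chunk _
  unfold Spec_ssl_checker
  have hiff : ssl_checker hypernets chunk = true ↔ ssl_checker_alt hypernets chunk = true := by
    rw [alt_iff]
    unfold ssl_checker
    by_cases h2 : chunk.toList.length ≤ 2
    · have hz : zip3 chunk.toList = [] := zip3_short _ (by omega)
      simp only [hz, List.not_mem_nil, false_and, exists_false, iff_false]
      simp only [if_pos h2]
      simp
    · simp only [if_neg h2]
      rw [sslLoopA_iff]
      simp only [List.drop_zero]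
      constructor <;> rintro ⟨t, ht, hp1, hp2, hp3⟩
      · exact ⟨t, ht, hp1, hp2, (bab_checker_iff hypernets t.1 t.2.1 t.2.2).1 hp3⟩
      · exact ⟨t, ht, hp1, hp2, (bab_checker_iff hypernets t.1 t.2.1 t.2.2).2 hp3⟩
  cases ha : ssl_checker hypernets chunk <;> cases hb : ssl_checker_alt hypernets chunk <;> simp_all
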